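-- pv_equiv track=rewrite | github.com/avisionig/PP2-Lab | lab2/o.py | toLetter
-- ===== SOURCE A (Python) =====
-- def toLetter(n):
--     temp = ''
--     while (n > 0):
--         d = n % 10
--         if (d == 1): temp = 'ONE' + temp
--         if (d == 2): temp = 'TWO' + temp
--         if (d == 3): temp = 'THR' + temp
--         if (d == 4): temp = 'FOU' + temp
--         if (d == 5): temp = 'FIV' + temp
--         if (d == 6): temp = 'SIX' + temp
--         if (d == 7): temp = 'SEV' + temp
--         if (d == 8): temp = 'EIG' + temp
--         if (d == 9): temp = 'NIN' + temp
--         if (d == 0): temp = 'ZER' + temp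
--         n //= 10
--     return temp
-- ===== SOURCE B (Python) =====
-- def _word(d):
--     if d == 0: return 'ZER'
--     if d == 1: return 'ONE'
--     if d == 2: return 'TWO'
--     if d == 3: return 'THR'
--     if d == 4: return 'FOU'
--     if d == 5: return 'FIV'
--     if d == 6: return 'SIX'
--     if d == 7: return 'SEV'
--     if d == 8: return 'EIG'
--     return 'NIN'
--
-- def toLetter(n):
--     if n <= 0:
--         return ''
--     return toLetter(n // 10) + _word(n % 10)
-- ===== Notes on version B (the rewrite author's own statement) =====
-- stated objective: simpler
-- what changed: Replaced the while-loop that prepends the code of the lowest digit under ten sequential if-statements with a structural recursion on the quotient digit-by-digit that appends the code of the last digit, with a single digit-to-code helper.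
import Mathlib
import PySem

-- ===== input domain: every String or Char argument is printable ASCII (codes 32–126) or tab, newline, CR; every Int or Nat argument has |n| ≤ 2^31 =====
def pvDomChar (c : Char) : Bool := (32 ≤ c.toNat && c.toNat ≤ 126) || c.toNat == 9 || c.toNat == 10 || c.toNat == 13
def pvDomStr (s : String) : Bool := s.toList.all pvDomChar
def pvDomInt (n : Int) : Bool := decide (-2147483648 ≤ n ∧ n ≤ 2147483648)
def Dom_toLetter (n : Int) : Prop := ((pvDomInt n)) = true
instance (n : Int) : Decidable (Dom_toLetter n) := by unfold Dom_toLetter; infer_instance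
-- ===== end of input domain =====

-- B rewrites A's while-loop (prepend lowest digit's code via ten sequential ifs) as a
-- structural recursion on n // 10 that appends the code of n % 10 (objective: simpler).

-- ===== PORT A =====
-- the loop body: d = n % 10; the ten sequential if-statements; n //= 10
def toLetterLoop (n : Int) (temp : String) : String :=
  if h : n > 0 then
    let d := PySem.Int.mod n 10
    let temp := if d = 1 then "ONE" ++ temp else temp
    let temp := if d = 2 then "TWO" ++ temp else temp
    let temp := if d = 3 then "THR" ++ temp else temp
    let temp := if d = 4 then "FOU" ++ temp else temp
    let temp := if d = 5 then "FIV" ++ temp else temp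
    let temp := if d = 6 then "SIX" ++ temp else temp
    let temp := if d = 7 then "SEV" ++ temp else temp
    let temp := if d = 8 then "EIG" ++ temp else temp
    let temp := if d = 9 then "NIN" ++ temp else temp
    let temp := if d = 0 then "ZER" ++ temp else temp
    toLetterLoop (PySem.Int.floordiv n 10) temp
  else temp
termination_by n.toNat
decreasing_by
  have h10 : (0:Int) < 10 := by omega
  rw [PySem.Int.floordiv_eq_ediv_of_pos h10]
  omega

def toLetter (n : Int) : String := toLetterLoop n ""

-- ===== PORT B =====
def pvWord (d : Int) : String :=
  if d = 0 then "ZER"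
  else if d = 1 then "ONE"
  else if d = 2 then "TWO"
  else if d = 3 then "THR"
  else if d = 4 then "FOU"
  else if d = 5 then "FIV"
  else if d = 6 then "SIX"
  else if d = 7 then "SEV"
  else if d = 8 then "EIG"
  else "NIN"

def toLetter_alt (n : Int) : String :=
  if h : n ≤ 0 then ""
  else toLetter_alt (PySem.Int.floordiv n 10) ++ pvWord (PySem.Int.mod n 10)
termination_by n.toNat
decreasing_by
  have h10 : (0:Int) < 10 := by omega
  rw [PySem.Int.floordiv_eq_ediv_of_pos h10]
  omega

-- ===== PRECONDITION & SPEC =====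
def Spec_toLetter (n : Int) (out : String) : Prop := out = toLetter_alt n
instance (n : Int) (out : String) : Decidable (Spec_toLetter n out) := by unfold Spec_toLetter; infer_instance

-- ===== CLAIM (what is proved, stated in full; the proofs are below) =====
def Claim_equal_toLetter : Prop := ∀ (n : Int), Dom_toLetter n → Spec_toLetter n (toLetter n)

-- ===== LEMMAS AND PROOFS =====

-- A's ten sequential ifs, applied to a digit 0–9, prepend exactly pvWord d
theorem ifs_eq_word (d : Int) (h0 : 0 ≤ d) (h9 : d < 10) (temp : String) :
    (let t := if d = 1 then "ONE" ++ temp else temp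
     let t := if d = 2 then "TWO" ++ t else t
     let t := if d = 3 then "THR" ++ t else t
     let t := if d = 4 then "FOU" ++ t else t
     let t := if d = 5 then "FIV" ++ t else t
     let t := if d = 6 then "SIX" ++ t else t
     let t := if d = 7 then "SEV" ++ t else t
     let t := if d = 8 then "EIG" ++ t else t
     let t := if d = 9 then "NIN" ++ t else t
     if d = 0 then "ZER" ++ t else t) = pvWord d ++ temp := by
  interval_cases d <;> simp [pvWord]

theorem loop_eq_alt (n : Int) (temp : String) :
    toLetterLoop n temp = toLetter_alt n ++ temp := by
  by_cases h : n > 0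
  · have h10 : (0:Int) < 10 := by omega
    have hm0 : 0 ≤ PySem.Int.mod n 10 := by
      rw [PySem.Int.mod_eq_emod_of_pos h10]; exact Int.emod_nonneg n (by omega)
    have hm9 : PySem.Int.mod n 10 < 10 := by
      rw [PySem.Int.mod_eq_emod_of_pos h10]; exact Int.emod_lt_of_pos n h10
    have hdec : (PySem.Int.floordiv n 10).toNat < n.toNat := by
      rw [PySem.Int.floordiv_eq_ediv_of_pos h10]; omega
    rw [toLetterLoop]
    simp only [h, dif_pos]
    rw [ifs_eq_word _ hm0 hm9]
    rw [loop_eq_alt (PySem.Int.floordiv n 10) (pvWord (PySem.Int.mod n 10) ++ temp)]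
    conv_rhs => rw [toLetter_alt]
    simp only [show ¬ n ≤ 0 by omega, dif_neg, not_false_iff]
    exact String.append_assoc.symm
  · rw [toLetterLoop, toLetter_alt]
    simp [h, show n ≤ 0 by omega]
termination_by n.toNat

-- ===== VERDICT (by name: the statement is the Claim_ definition above) =====
theorem toLetter_spec : Claim_equal_toLetter := by
  intro n _
  unfold Spec_toLetter toLetter
  rw [loop_eq_alt]
  simp
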